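-- pv_equiv track=rewrite | github.com/n00-name/EGE-inf-2025 | rep/22.08.24/4.py | F
-- ===== SOURCE A (Python) =====
-- def F(n):
--     if n <= 1:
--         return 1
--     elif n == 2:
--         return 2
--     elif n > 2 and n % 4 == 0:
--         return n - F(n // 4) - F(n - 4)
--     elif n > 2 and n % 4 != 0:
--         return 2 + F(n - 1) + F(n // 5)
-- ===== SOURCE B (Python) =====
-- def F(n):
--     if n <= 1:
--         return 1
--     if n == 2:
--         return 2
--     dp = [0] * (n + 1)
--     for i in range(n + 1):
--         if i <= 1:
--             dp[i] = 1
--         elif i == 2: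
--             dp[i] = 2
--         elif i % 4 == 0:
--             dp[i] = i - dp[i // 4] - dp[i - 4]
--         else:
--             dp[i] = 2 + dp[i - 1] + dp[i // 5]
--     return dp[n]
-- ===== Notes on version B (the rewrite author's own statement) =====
-- stated objective: faster
-- what changed: Replaced the exponential top-down recursion by a bottom-up dynamic-programming table dp[0..n] filled in one pass, so each value is computed once.
import Mathlib
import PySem

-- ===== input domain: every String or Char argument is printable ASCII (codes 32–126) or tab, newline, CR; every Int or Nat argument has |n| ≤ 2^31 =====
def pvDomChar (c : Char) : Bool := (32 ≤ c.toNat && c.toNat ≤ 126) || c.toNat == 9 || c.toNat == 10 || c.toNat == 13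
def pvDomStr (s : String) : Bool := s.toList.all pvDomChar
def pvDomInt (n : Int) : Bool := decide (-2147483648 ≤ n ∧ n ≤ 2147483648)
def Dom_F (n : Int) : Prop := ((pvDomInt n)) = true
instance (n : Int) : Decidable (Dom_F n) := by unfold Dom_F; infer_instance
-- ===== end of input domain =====

-- B replaces A's exponential recursion by a bottom-up table filled over 0..n.

-- ===== PORT A =====
-- literal transliteration of A's recursion; the final 'else 0' is Python's implicit
-- fall-through, unreachable: an integer with ¬(n ≤ 1) and n ≠ 2 satisfies n > 2.
-- fuel-based totalization: fuel = n.toNat + 1 always suffices (each recursive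
-- argument is smaller and nonnegative-bounded), so the branch structure is A's exactly.
def FGo : Nat → Int → Int
  | 0, _ => 0
  | (fuel+1), n =>
    if n ≤ 1 then 1
    else if n = 2 then 2
    else if n > 2 ∧ PySem.Int.mod n 4 = 0 then
      n - FGo fuel (PySem.Int.floordiv n 4) - FGo fuel (n - 4)
    else if n > 2 ∧ PySem.Int.mod n 4 ≠ 0 then
      2 + FGo fuel (n - 1) + FGo fuel (PySem.Int.floordiv n 5)
    else 0

def F (n : Int) : Int := FGo (n.toNat + 1) n

-- ===== PORT B =====
-- per-index value of the dp fill, reading already-filled entries of dp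
def valB (dp : List Int) (i : Nat) : Int :=
  if i ≤ 1 then 1
  else if i = 2 then 2
  else if i % 4 = 0 then (i : Int) - dp.getD (i / 4) 0 - dp.getD (i - 4) 0
  else 2 + dp.getD (i - 1) 0 + dp.getD (i / 5) 0

-- dp = [0]*(n+1); for i in range(n+1): dp[i] = …
def buildB (n : Nat) : List Int :=
  (List.range (n + 1)).foldl (fun dp i => dp.set i (valB dp i)) (List.replicate (n + 1) 0)

def F_alt (n : Int) : Int :=
  if n ≤ 1 then 1
  else if n = 2 then 2
  else (buildB n.toNat).getD n.toNat 0

-- ===== PRECONDITION & SPEC =====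
def Spec_F (n : Int) (out : Int) : Prop := out = F_alt n
instance (n : Int) (out : Int) : Decidable (Spec_F n out) := by unfold Spec_F; infer_instance

-- ===== CLAIM (what is proved, stated in full; the proofs are below) =====
def Claim_equal_F : Prop := ∀ (n : Int), Dom_F n → Spec_F n (F n)

-- ===== LEMMAS AND PROOFS =====

-- unfold A's recursion once at a Nat cast, with Python's // and % turned into Nat arithmetic
theorem FGo_fuel (f1 : Nat) : ∀ (f2 : Nat) (n : Int),
    n.toNat < f1 → n.toNat < f2 → FGo f1 n = FGo f2 n := by
  induction f1 with
  | zero => intro f2 n h1 h2; omega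
  | succ f1 ih =>
    intro f2 n h1 h2
    match f2, h2 with
    | f2+1, h2 =>
    simp only [FGo]
    rw [PySem.Int.mod_eq_emod_of_pos (show (0:Int) < 4 by norm_num),
        PySem.Int.floordiv_eq_ediv_of_pos (show (0:Int) < 4 by norm_num),
        PySem.Int.floordiv_eq_ediv_of_pos (show (0:Int) < 5 by norm_num)]
    by_cases hA : n ≤ 1
    · simp [hA]
    · by_cases hB : n = 2
      · simp [hB]
      · simp only [if_neg hA, if_neg hB]
        by_cases h4 : n % 4 = 0
        · rw [if_pos (show n > 2 ∧ n % 4 = 0 by omega),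
              if_pos (show n > 2 ∧ n % 4 = 0 by omega),
              ih f2 (n / 4) (by omega) (by omega), ih f2 (n - 4) (by omega) (by omega)]
        · rw [if_neg (show ¬(n > 2 ∧ n % 4 = 0) by omega),
              if_neg (show ¬(n > 2 ∧ n % 4 = 0) by omega),
              if_pos (show n > 2 ∧ n % 4 ≠ 0 by omega),
              if_pos (show n > 2 ∧ n % 4 ≠ 0 by omega),
              ih f2 (n - 1) (by omega) (by omega), ih f2 (n / 5) (by omega) (by omega)]

-- unfold A's recursion once at a Nat cast, with Python's // and % turned into Nat arithmetic
theorem F_natCast (k : Nat) :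
    F (k : Int) = if k ≤ 1 then 1 else if k = 2 then 2
      else if k % 4 = 0 then (k : Int) - F ((k / 4 : Nat) : Int) - F (((k - 4 : Nat) : Int))
      else 2 + F (((k - 1 : Nat) : Int)) + F ((k / 5 : Nat) : Int) := by
  have hF : ∀ (m : Nat), m < k → FGo k (m : Int) = F (m : Int) := by
    intro m hm
    have : F ((m : Int)) = FGo ((m : Int).toNat + 1) (m : Int) := rfl
    rw [this]
    exact FGo_fuel k ((m : Int).toNat + 1) (m : Int) (by simp; omega) (by omega)
  have hunf : F (k : Int) = FGo (k + 1) (k : Int) := by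
    simp [F]
  rw [hunf]
  simp only [FGo]
  rw [PySem.Int.mod_eq_emod_of_pos (show (0:Int) < 4 by norm_num),
      PySem.Int.floordiv_eq_ediv_of_pos (show (0:Int) < 4 by norm_num),
      PySem.Int.floordiv_eq_ediv_of_pos (show (0:Int) < 5 by norm_num)]
  by_cases h1 : k ≤ 1
  · rw [if_pos (show (k:Int) ≤ 1 by omega), if_pos h1]
  · rw [if_neg (show ¬(k:Int) ≤ 1 by omega), if_neg h1]
    by_cases h2 : k = 2
    · rw [if_pos (show (k:Int) = 2 by omega), if_pos h2]
    · rw [if_neg (show ¬(k:Int) = 2 by omega), if_neg h2]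
      by_cases h4 : k % 4 = 0
      · rw [if_pos (show (k:Int) > 2 ∧ (k:Int) % 4 = 0 by omega), if_pos h4,
            show (k:Int) / 4 = ((k / 4 : Nat) : Int) by omega,
            show (k:Int) - 4 = ((k - 4 : Nat) : Int) by omega,
            hF (k / 4) (by omega), hF (k - 4) (by omega)]
      · rw [if_neg (show ¬((k:Int) > 2 ∧ (k:Int) % 4 = 0) by omega), if_neg h4,
            if_pos (show (k:Int) > 2 ∧ (k:Int) % 4 ≠ 0 by omega),
            show (k:Int) - 1 = ((k - 1 : Nat) : Int) by omega,
            show (k:Int) / 5 = ((k / 5 : Nat) : Int) by omega,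
            hF (k - 1) (by omega), hF (k / 5) (by omega)]

-- partial-loop state of buildB after the first k iterations
def dpAt (n k : Nat) : List Int :=
  (List.range k).foldl (fun dp i => dp.set i (valB dp i)) (List.replicate (n + 1) 0)

theorem dpAt_succ (n k : Nat) :
    dpAt n (k + 1) = (dpAt n k).set k (valB (dpAt n k) k) := by
  simp [dpAt, List.range_succ]

theorem dpAt_length (n k : Nat) : (dpAt n k).length = n + 1 := by
  induction k with
  | zero => simp [dpAt]
  | succ k ih => simp [dpAt_succ, ih]

theorem dpAt_correct (n : Nat) :
    ∀ k, k ≤ n + 1 → ∀ j, j < k → (dpAt n k).getD j 0 = F (j : Int) := by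
  intro k
  induction k with
  | zero => intro _ j hj; omega
  | succ k ih =>
    intro hk j hj
    have hlen : (dpAt n k).length = n + 1 := dpAt_length n k
    rw [dpAt_succ, List.getD]
    by_cases hjk : j = k
    · subst hjk
      rw [List.getElem?_set_self (by omega)]
      -- the freshly written entry equals F j
      rw [F_natCast j, valB]
      by_cases h1 : j ≤ 1
      · simp [h1]
      · by_cases h2 : j = 2
        · simp [h2]
        · by_cases h4 : j % 4 = 0
          · simp only [if_neg h1, if_neg h2, if_pos h4, Option.getD_some]
            rw [ih (by omega) (j / 4) (by omega), ih (by omega) (j - 4) (by omega)]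
          · simp only [if_neg h1, if_neg h2, if_neg h4, Option.getD_some]
            rw [ih (by omega) (j - 1) (by omega), ih (by omega) (j / 5) (by omega)]
    · rw [List.getElem?_set_ne (fun h => hjk h.symm)]
      exact ih (by omega) j (by omega)

theorem buildB_correct (n j : Nat) (hj : j ≤ n) : (buildB n).getD j 0 = F (j : Int) := by
  have hb : buildB n = dpAt n (n + 1) := rfl
  rw [hb]
  exact dpAt_correct n (n + 1) le_rfl j (by omega)

-- ===== VERDICT (by name: the statement is the Claim_ definition above) =====
theorem F_spec : Claim_equal_F := by
  intro n _
  unfold Spec_F F_alt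
  by_cases h1 : n ≤ 1
  · simp [F, FGo, h1]
  · by_cases h2 : n = 2
    · subst h2; simp [F, FGo]
    · rw [if_neg h1, if_neg h2]
      have hn : n = (n.toNat : Int) := by omega
      rw [buildB_correct n.toNat n.toNat le_rfl, ← hn]
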